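-- pv_equiv track=rewrite | github.com/DeciferBot/decifer-trading | agents.py | _extract_technical_conviction
-- ===== SOURCE A (Python) =====
-- def _extract_technical_conviction(tech_text: str, symbol: str) -> int:
--     """+1 if technical report rated this symbol HIGH conviction, else 0."""
--     if not tech_text:
--         return 0
--     upper = tech_text.upper()
--     idx = upper.find(symbol)
--     while idx != -1:
--         window = upper[max(0, idx - 20) : idx + 120]
--         if "HIGH" in window:
--             return 1
--         idx = upper.find(symbol, idx + 1)
--     return 0
-- ===== SOURCE B (Python) =====
-- def _extract_technical_conviction(tech_text: str, symbol: str) -> int: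
--     """+1 if technical report rated this symbol HIGH conviction, else 0."""
--     upper = tech_text.upper()
--     highs = []
--     h = upper.find("HIGH")
--     while h != -1:
--         highs.append(h)
--         h = upper.find("HIGH", h + 1)
--     if not highs:
--         return 0
--     idx = upper.find(symbol)
--     while idx != -1:
--         lo = max(0, idx - 20)
--         hi = idx + 120  # the window is upper[lo:hi]; "HIGH" must fit inside it
--         if any(lo <= h and h + len("HIGH") <= hi for h in highs):
--             return 1
--         idx = upper.find(symbol, idx + 1)
--     return 0
-- ===== Notes on version B (the rewrite author's own statement) =====
-- stated objective: alternative
-- what changed: A rescans a sliced 140-char window with a substring search at every symbol occurrence; B collects the start positions of every 'HIGH' once up front and replaces the per-occurrence slicing/substring search by an arithmetic containment test of those positions in the window, with an early exit when the text contains no 'HIGH' at all.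
import Mathlib
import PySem

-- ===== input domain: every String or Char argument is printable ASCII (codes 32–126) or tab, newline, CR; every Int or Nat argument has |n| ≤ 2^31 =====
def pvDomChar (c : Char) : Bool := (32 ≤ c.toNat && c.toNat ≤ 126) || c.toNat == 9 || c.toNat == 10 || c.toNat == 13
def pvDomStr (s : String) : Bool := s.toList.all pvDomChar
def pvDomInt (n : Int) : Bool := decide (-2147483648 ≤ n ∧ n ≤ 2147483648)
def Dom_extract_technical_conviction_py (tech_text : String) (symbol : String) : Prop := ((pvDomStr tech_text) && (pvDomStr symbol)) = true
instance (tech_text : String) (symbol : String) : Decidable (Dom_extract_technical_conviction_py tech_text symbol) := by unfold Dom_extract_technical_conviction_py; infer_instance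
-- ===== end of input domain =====

-- B collects the start positions of every "HIGH" once up front and tests window containment
-- arithmetically per symbol occurrence, instead of re-slicing and substring-searching a window
-- each time; objective: alternative (same behaviour, different algorithm, not claimed faster).

-- ===== PORT A =====
def pvHigh : List Char := ['H', 'I', 'G', 'H']

theorem pvFindFrom_facts (u sym : List Char) (start : Nat)
    (h : PySem.Chars.findFrom u sym (start : Int) none ≠ -1) :
    start ≤ u.length ∧ (start : Int) ≤ PySem.Chars.findFrom u sym (start : Int) none ∧
      (PySem.Chars.findFrom u sym (start : Int) none).toNat ≤ u.length := by
  have hle : start ≤ u.length := by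
    by_contra hgt
    push Not at hgt
    apply h
    have h0 : ¬((start : Int) < 0) := by omega
    simp only [PySem.Chars.findFrom, h0, if_false]
    rw [if_pos (by exact_mod_cast hgt)]
  obtain ⟨h1, h2, h3⟩ := PySem.Chars.findFrom_natCast_spec u sym start hle h
  refine ⟨hle, h1, ?_⟩
  by_cases hs : sym = []
  · subst hs
    by_contra hgt
    exact h3 start (le_refl start) (by omega) (List.nil_prefix)
  · have hne : List.drop (PySem.Chars.findFrom u sym (start : Int) none).toNat u ≠ [] := by
      intro hnil
      exact hs (List.prefix_nil.mp (hnil ▸ h2))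
    have := List.drop_eq_nil_iff.not.mp hne
    omega

def pvALoop (u sym : List Char) (start : Nat) : Int :=
  let idx := PySem.Chars.findFrom u sym (start : Int) none
  if hidx : idx = -1 then 0
  else if PySem.Chars.isIn pvHigh
      (PySem.List.slice u (some (max 0 (idx - 20))) (some (idx + 120))) then 1
  else pvALoop u sym (idx.toNat + 1)
termination_by u.length + 1 - start
decreasing_by
  have := pvFindFrom_facts u sym start hidx
  omega

def extract_technical_conviction_py (tech_text : String) (symbol : String) : Int :=
  if tech_text.toList = [] then 0   -- `if not tech_text: return 0`
  else pvALoop (PySem.Chars.upper tech_text.toList) symbol.toList 0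

-- ===== PORT B =====
-- the `while h != -1: highs.append(h)` loop of Source B
def pvHighsLoop (u : List Char) (start : Nat) : List Nat :=
  let h := PySem.Chars.findFrom u pvHigh (start : Int) none
  if hh : h = -1 then []
  else h.toNat :: pvHighsLoop u (h.toNat + 1)
termination_by u.length + 1 - start
decreasing_by
  have := pvFindFrom_facts u pvHigh start hh
  omega

-- the `while idx != -1` loop of Source B with its `any(lo <= h and h + len("HIGH") <= hi …)` test
def pvBLoop (u sym : List Char) (highs : List Nat) (start : Nat) : Int :=
  let idx := PySem.Chars.findFrom u sym (start : Int) none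
  if hidx : idx = -1 then 0
  else if highs.any (fun h =>
      decide (max 0 (idx - 20) ≤ (h : Int)) && decide ((h : Int) + 4 ≤ idx + 120)) then 1
  else pvBLoop u sym highs (idx.toNat + 1)
termination_by u.length + 1 - start
decreasing_by
  have := pvFindFrom_facts u sym start hidx
  omega

def extract_technical_conviction_py_alt (tech_text : String) (symbol : String) : Int :=
  let u := PySem.Chars.upper tech_text.toList
  let highs := pvHighsLoop u 0
  if highs = [] then 0
  else pvBLoop u symbol.toList highs 0

-- ===== PRECONDITION & SPEC =====
def Spec_extract_technical_conviction_py (tech_text : String) (symbol : String) (out : Int) : Prop := out = extract_technical_conviction_py_alt tech_text symbol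
instance (tech_text : String) (symbol : String) (out : Int) : Decidable (Spec_extract_technical_conviction_py tech_text symbol out) := by unfold Spec_extract_technical_conviction_py; infer_instance

-- ===== CLAIM (what is proved, stated in full; the proofs are below) =====
def Claim_equal_extract_technical_conviction_py : Prop := ∀ (tech_text : String) (symbol : String), Dom_extract_technical_conviction_py tech_text symbol → Spec_extract_technical_conviction_py tech_text symbol (extract_technical_conviction_py tech_text symbol)

-- ===== LEMMAS AND PROOFS =====

theorem pvInfix_iff_prefix_drop {α : Type} (p s : List α) : p <:+: s ↔ ∃ j, p <+: s.drop j := by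
  constructor
  · rintro ⟨a, b, rfl⟩; exact ⟨a.length, by simp⟩
  · rintro ⟨j, h⟩; exact h.isInfix.trans (s.drop_suffix j).isInfix

theorem pvHigh_drop_bound (u : List Char) (h : Nat) (hp : pvHigh <+: u.drop h) :
    h + 4 ≤ u.length := by
  have := hp.length_le
  simp [pvHigh] at this
  omega

theorem pvWindow_iff (u : List Char) (i : Nat) :
    PySem.Chars.isIn pvHigh
      (PySem.List.slice u (some (max 0 ((i : Int) - 20))) (some ((i : Int) + 120))) = true
    ↔ ∃ h : Nat, pvHigh <+: u.drop h ∧ i - 20 ≤ h ∧ h ≤ i + 116 := by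
  rw [PySem.Chars.isIn_iff_infix,
    PySem.List.slice_toNat u (by omega : (0:Int) ≤ max 0 ((i : Int) - 20)) (by omega : (0:Int) ≤ (i : Int) + 120)]
  have ha : (max 0 ((i : Int) - 20)).toNat = i - 20 := by omega
  have hb : ((i : Int) + 120).toNat = i + 120 := by omega
  rw [ha, hb, pvInfix_iff_prefix_drop]
  constructor
  · rintro ⟨j, hj⟩
    rw [List.drop_take, List.drop_drop, List.prefix_take_iff] at hj
    refine ⟨i - 20 + j, hj.1, by omega, ?_⟩
    have := hj.2
    simp [pvHigh] at this
    omega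
  · rintro ⟨h, hp, h1, h2⟩
    refine ⟨h - (i - 20), ?_⟩
    rw [List.drop_take, List.drop_drop, List.prefix_take_iff]
    have heq : i - 20 + (h - (i - 20)) = h := by omega
    rw [heq]
    refine ⟨hp, ?_⟩
    simp [pvHigh]
    omega

theorem pvHighsLoop_eq (u : List Char) (start : Nat) :
    pvHighsLoop u start =
      if PySem.Chars.findFrom u pvHigh (start : Int) none = -1 then []
      else (PySem.Chars.findFrom u pvHigh (start : Int) none).toNat ::
        pvHighsLoop u ((PySem.Chars.findFrom u pvHigh (start : Int) none).toNat + 1) := by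
  rw [pvHighsLoop]; simp only [dite_eq_ite]

theorem mem_pvHighsLoop (u : List Char) (start : Nat) (h : Nat) :
    h ∈ pvHighsLoop u start ↔ start ≤ h ∧ pvHigh <+: u.drop h := by
  induction start using pvHighsLoop.induct (u := u) with
  | case1 x r hr =>
    have hr' : PySem.Chars.findFrom u pvHigh (x : Int) none = -1 := hr
    rw [pvHighsLoop_eq, if_pos hr']
    simp only [List.not_mem_nil, false_iff]
    rintro ⟨hx, hp⟩
    have h4 := pvHigh_drop_bound u h hp
    have hxle : x ≤ u.length := by omega
    apply (PySem.Chars.findFrom_natCast_eq_neg_one_iff u pvHigh x hxle).mp hr'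
    rw [pvInfix_iff_prefix_drop]
    refine ⟨h - x, ?_⟩
    rw [List.drop_drop, (by omega : x + (h - x) = h)]
    exact hp
  | case2 x r hr ih =>
    have hr' : PySem.Chars.findFrom u pvHigh (x : Int) none ≠ -1 := hr
    have hrdef : r = PySem.Chars.findFrom u pvHigh (x : Int) none := rfl
    rw [hrdef] at ih
    rw [pvHighsLoop_eq, if_neg hr']
    obtain ⟨hle, hge, hlen⟩ := pvFindFrom_facts u pvHigh x hr'
    obtain ⟨-, hpre, hmin⟩ := PySem.Chars.findFrom_natCast_spec u pvHigh x hle hr'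
    simp only [List.mem_cons, ih]
    constructor
    · rintro (rfl | ⟨h1, h2⟩)
      · exact ⟨by omega, hpre⟩
      · exact ⟨by omega, h2⟩
    · rintro ⟨h1, h2⟩
      rcases Nat.lt_or_ge h (PySem.Chars.findFrom u pvHigh (x : Int) none).toNat with hlt | hge2
      · exact absurd h2 (hmin h h1 hlt)
      · rcases Nat.eq_or_lt_of_le hge2 with heq | hlt
        · exact Or.inl heq.symm
        · exact Or.inr ⟨by omega, h2⟩

-- the hit test of A (substring search in the sliced window) equals the hit test of B
-- (arithmetic containment over the precomputed "HIGH" positions)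
theorem pvHit_eq (u : List Char) (i : Nat) :
    PySem.Chars.isIn pvHigh
      (PySem.List.slice u (some (max 0 ((i : Int) - 20))) (some ((i : Int) + 120))) =
    (pvHighsLoop u 0).any (fun h =>
      decide (max 0 ((i : Int) - 20) ≤ (h : Int)) && decide ((h : Int) + 4 ≤ (i : Int) + 120)) := by
  rw [Bool.eq_iff_iff, pvWindow_iff]
  simp only [List.any_eq_true, mem_pvHighsLoop, Bool.and_eq_true, decide_eq_true_eq]
  constructor
  · rintro ⟨h, hp, h1, h2⟩; exact ⟨h, ⟨Nat.zero_le _, hp⟩, by omega, by omega⟩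
  · rintro ⟨h, ⟨-, hp⟩, h1, h2⟩; exact ⟨h, hp, by omega, by omega⟩

theorem pvALoop_eq (u sym : List Char) (start : Nat) :
    pvALoop u sym start =
      if PySem.Chars.findFrom u sym (start : Int) none = -1 then 0
      else if PySem.Chars.isIn pvHigh
          (PySem.List.slice u (some (max 0 (PySem.Chars.findFrom u sym (start : Int) none - 20)))
            (some (PySem.Chars.findFrom u sym (start : Int) none + 120))) then 1
      else pvALoop u sym ((PySem.Chars.findFrom u sym (start : Int) none).toNat + 1) := by
  rw [pvALoop]; simp only [dite_eq_ite]

theorem pvBLoop_eq (u sym : List Char) (highs : List Nat) (start : Nat) :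
    pvBLoop u sym highs start =
      if PySem.Chars.findFrom u sym (start : Int) none = -1 then 0
      else if highs.any (fun h =>
          decide (max 0 (PySem.Chars.findFrom u sym (start : Int) none - 20) ≤ (h : Int)) &&
          decide ((h : Int) + 4 ≤ PySem.Chars.findFrom u sym (start : Int) none + 120)) then 1
      else pvBLoop u sym highs ((PySem.Chars.findFrom u sym (start : Int) none).toNat + 1) := by
  rw [pvBLoop]; simp only [dite_eq_ite]

theorem pvBLoop_eq_pvALoop (u sym : List Char) (start : Nat) :
    pvBLoop u sym (pvHighsLoop u 0) start = pvALoop u sym start := by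
  induction start using pvALoop.induct (u := u) (sym := sym) with
  | case1 x r hr =>
    have hr' : PySem.Chars.findFrom u sym (x : Int) none = -1 := hr
    rw [pvBLoop_eq, pvALoop_eq, if_pos hr', if_pos hr']
  | case2 x r hr hhit =>
    have hr' : PySem.Chars.findFrom u sym (x : Int) none ≠ -1 := hr
    have hhit' : PySem.Chars.isIn pvHigh
        (PySem.List.slice u (some (max 0 (PySem.Chars.findFrom u sym (x : Int) none - 20)))
          (some (PySem.Chars.findFrom u sym (x : Int) none + 120))) = true := hhit
    obtain ⟨hle, hge, hlen⟩ := pvFindFrom_facts u sym x hr'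
    have hcast : PySem.Chars.findFrom u sym (x : Int) none
        = (((PySem.Chars.findFrom u sym (x : Int) none).toNat : Nat) : Int) := by omega
    rw [pvBLoop_eq, pvALoop_eq, if_neg hr', if_neg hr', if_pos hhit']
    rw [if_pos (by rw [hcast] at hhit' ⊢; rw [← pvHit_eq]; exact hhit')]
  | case3 x r hr hhit ih =>
    have hr' : PySem.Chars.findFrom u sym (x : Int) none ≠ -1 := hr
    have hhit' : ¬ PySem.Chars.isIn pvHigh
        (PySem.List.slice u (some (max 0 (PySem.Chars.findFrom u sym (x : Int) none - 20)))
          (some (PySem.Chars.findFrom u sym (x : Int) none + 120))) = true := hhit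
    obtain ⟨hle, hge, hlen⟩ := pvFindFrom_facts u sym x hr'
    have hcast : PySem.Chars.findFrom u sym (x : Int) none
        = (((PySem.Chars.findFrom u sym (x : Int) none).toNat : Nat) : Int) := by omega
    rw [pvBLoop_eq, pvALoop_eq, if_neg hr', if_neg hr', if_neg hhit']
    rw [if_neg (by rw [hcast] at hhit' ⊢; rw [← pvHit_eq]; exact hhit'), ih]

-- when the text holds no "HIGH" at all, A's loop never hits
theorem pvALoop_of_no_high (u sym : List Char) (start : Nat)
    (hnone : pvHighsLoop u 0 = []) : pvALoop u sym start = 0 := by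
  induction start using pvALoop.induct (u := u) (sym := sym) with
  | case1 x r hr =>
    rw [pvALoop_eq, if_pos (show PySem.Chars.findFrom u sym (x : Int) none = -1 from hr)]
  | case2 x r hr hhit =>
    exfalso
    have hhit' : PySem.Chars.isIn pvHigh
        (PySem.List.slice u (some (max 0 (PySem.Chars.findFrom u sym (x : Int) none - 20)))
          (some (PySem.Chars.findFrom u sym (x : Int) none + 120))) = true := hhit
    have hr' : PySem.Chars.findFrom u sym (x : Int) none ≠ -1 := hr
    obtain ⟨hle, hge, hlen⟩ := pvFindFrom_facts u sym x hr'
    have hcast : PySem.Chars.findFrom u sym (x : Int) none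
        = (((PySem.Chars.findFrom u sym (x : Int) none).toNat : Nat) : Int) := by omega
    rw [hcast, pvWindow_iff] at hhit'
    obtain ⟨h, hp, -, -⟩ := hhit'
    have : h ∈ pvHighsLoop u 0 := (mem_pvHighsLoop u 0 h).mpr ⟨Nat.zero_le _, hp⟩
    rw [hnone] at this
    exact List.not_mem_nil this
  | case3 x r hr hhit ih =>
    rw [pvALoop_eq, if_neg (show PySem.Chars.findFrom u sym (x : Int) none ≠ -1 from hr),
      if_neg (show ¬ _ = true from hhit)]
    exact ih

-- ===== VERDICT (by name: the statement is the Claim_ definition above) =====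
theorem extract_technical_conviction_py_spec : Claim_equal_extract_technical_conviction_py := by
  intro t s _
  unfold Spec_extract_technical_conviction_py
  have halt : extract_technical_conviction_py_alt t s =
      (if pvHighsLoop (PySem.Chars.upper t.toList) 0 = [] then 0
       else pvBLoop (PySem.Chars.upper t.toList) s.toList
         (pvHighsLoop (PySem.Chars.upper t.toList) 0) 0) := rfl
  unfold extract_technical_conviction_py
  by_cases hnil : t.toList = []
  · have hhe : pvHighsLoop (PySem.Chars.upper t.toList) 0 = [] := by
      rw [hnil, show PySem.Chars.upper ([] : List Char) = [] from by simp [PySem.Chars.upper],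
        pvHighsLoop_eq, if_pos (by decide)]
    rw [if_pos hnil, halt, if_pos hhe]
  · rw [if_neg hnil, halt]
    by_cases hh : pvHighsLoop (PySem.Chars.upper t.toList) 0 = []
    · rw [if_pos hh]
      exact pvALoop_of_no_high _ _ 0 hh
    · rw [if_neg hh]
      exact (pvBLoop_eq_pvALoop _ _ 0).symm
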